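-- pv_equiv track=rewrite | github.com/benjaminpcarron-sys/dc-site-analysis | archive/cursor_scoring/scoring.py | _worst_deposit_severity
-- ===== SOURCE A (Python) =====
-- _DEPOSIT_SEVERITY_P = {
--     "light": 0.05,
--     "moderate": 0.15,
--     "onerous": 0.30,
--     "prohibitive": 0.50,
-- }
--
-- def _tariff_deposit_severity(t: dict) -> str:
--     """Return the deposit-severity tier for a tariff entry.
--
--     Prefers an explicit ``deposit_severity`` field. Falls back to the legacy
--     binary ``deposit_onerous`` -> "onerous" / "light" mapping so existing
--     entries work without hand-edits. See
--     ``docs/screen_methodology/onerous_tariff_deposit.md``.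
--     """
--     sev = t.get("deposit_severity")
--     if sev in _DEPOSIT_SEVERITY_P:
--         return sev
--     return "onerous" if t.get("deposit_onerous") else "light"
--
-- def _worst_deposit_severity(tariffs: list[dict]) -> str | None:
--     """Return the worst severity among matched tariffs, or None if none are
--     at-or-above the firing threshold ('moderate')."""
--     if not tariffs:
--         return None
--     firing = [
--         _tariff_deposit_severity(t) for t in tariffs
--         if _tariff_deposit_severity(t) != "light"
--     ]
--     if not firing:
--         return None
--     return max(firing, key=lambda s: _DEPOSIT_SEVERITY_P[s])
-- ===== SOURCE B (Python) =====
-- # B: one numeric pass — map each tariff to an integer rank (0..3), keep the running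
-- # maximum, and translate the final rank back to a tier name (0 -> None).
--
-- _RANK = {"light": 0, "moderate": 1, "onerous": 2, "prohibitive": 3}
-- _NAME = {1: "moderate", 2: "onerous", 3: "prohibitive"}
--
--
-- def _worst_deposit_severity(tariffs: list[dict]) -> str | None:
--     worst = 0
--     for t in tariffs:
--         sev = t.get("deposit_severity")
--         if sev not in _RANK:
--             sev = "onerous" if t.get("deposit_onerous") else "light"
--         r = _RANK[sev]
--         if r > worst:
--             worst = r
--     return _NAME.get(worst)
-- ===== Notes on version B (the rewrite author's own statement) =====
-- stated objective: alternative
-- what changed: Replaces the two-stage build-filter-then-max-by-float-probability pipeline with a single pass that tracks the maximum integer rank (0..3) of the tiers and decodes the final rank back to a name (rank 0 -> None), removing the intermediate 'firing' list and the float key entirely.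
import Mathlib
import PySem

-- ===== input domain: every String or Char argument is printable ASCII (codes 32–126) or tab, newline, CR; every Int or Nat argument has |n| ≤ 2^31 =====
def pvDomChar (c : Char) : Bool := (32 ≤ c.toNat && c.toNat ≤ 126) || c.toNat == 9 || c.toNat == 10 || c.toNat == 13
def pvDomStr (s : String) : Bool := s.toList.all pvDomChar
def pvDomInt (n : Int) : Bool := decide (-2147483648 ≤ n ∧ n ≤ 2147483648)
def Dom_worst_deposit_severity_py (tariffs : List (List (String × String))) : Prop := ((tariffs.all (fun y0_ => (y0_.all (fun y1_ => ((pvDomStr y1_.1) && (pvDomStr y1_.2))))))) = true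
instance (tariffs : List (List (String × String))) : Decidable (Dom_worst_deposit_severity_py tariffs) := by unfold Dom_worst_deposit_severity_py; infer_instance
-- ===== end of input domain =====

-- B replaces A's build-firing-list-then-max-by-probability pipeline with a single running-maximum
-- pass over integer tier ranks, decoded back to a tier name at the end; equal on all inputs.

-- ===== PORT A =====
-- t.get(k) on an association-list dict: first match.
def pvGetAssoc (t : List (String × String)) (k : String) : Option String :=
  (t.find? (fun p => p.1 == k)).map (·.2)

-- Python truthiness of an optional string value: present and non-empty.
def pvTruthy (v : Option String) : Bool :=
  match v with
  | some s => s != ""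
  | none => false

-- 'sev in _DEPOSIT_SEVERITY_P' (key membership).
def pvInSevDict (s : String) : Bool :=
  s == "light" || s == "moderate" || s == "onerous" || s == "prohibitive"

-- _DEPOSIT_SEVERITY_P[s], scaled by 100 to Int: comparisons among the four float
-- literals 0.05/0.15/0.30/0.50 are exact, so the scaled-integer key orders identically.
-- The 0 default is the (unreachable for firing elements) KeyError branch.
def pvSevP (s : String) : Int :=
  if s == "light" then 5
  else if s == "moderate" then 15
  else if s == "onerous" then 30
  else if s == "prohibitive" then 50
  else 0

def tariff_deposit_severity_py (t : List (String × String)) : String :=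
  match pvGetAssoc t "deposit_severity" with
  | some s =>
      if pvInSevDict s then s
      else if pvTruthy (pvGetAssoc t "deposit_onerous") then "onerous" else "light"
  | none => if pvTruthy (pvGetAssoc t "deposit_onerous") then "onerous" else "light"

def worst_deposit_severity_py (tariffs : List (List (String × String))) : Option String :=
  if tariffs = [] then none
  else
    let firing := (tariffs.map tariff_deposit_severity_py).filter (fun s => s != "light")
    if firing = [] then none
    else PySem.List.max? firing pvSevP

-- ===== PORT B =====
-- _RANK and _NAME, Source B's two lookup tables, as PySem dicts.
def pvRankTbl : PySem.Dict String Int :=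
  PySem.Dict.mk [("light", 0), ("moderate", 1), ("onerous", 2), ("prohibitive", 3)]

def pvNameTbl : PySem.Dict Int String :=
  PySem.Dict.mk [(1, "moderate"), (2, "onerous"), (3, "prohibitive")]

-- the loop body of Source B: the integer rank of one tariff (sev resolution inlined as in Source B)
def pvRankOf (t : List (String × String)) : Int :=
  let d : PySem.Dict String String := PySem.Dict.mk t
  let sev0 := d.get? "deposit_severity"
  let sev : String :=
    match sev0 with
    | some s =>
        if pvRankTbl.contains s then s
        else match d.get? "deposit_onerous" with
             | some v => if v != "" then "onerous" else "light"
             | none => "light"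
    | none =>
        match d.get? "deposit_onerous" with
        | some v => if v != "" then "onerous" else "light"
        | none => "light"
  pvRankTbl.getD sev 0

def worst_deposit_severity_py_alt (tariffs : List (List (String × String))) : Option String :=
  let worst : Int := tariffs.foldl (fun w t => let r := pvRankOf t; if r > w then r else w) 0
  pvNameTbl.get? worst

-- ===== PRECONDITION & SPEC =====
def Spec_worst_deposit_severity_py (tariffs : List (List (String × String))) (out : Option String) : Prop := out = worst_deposit_severity_py_alt tariffs
instance (tariffs : List (List (String × String))) (out : Option String) : Decidable (Spec_worst_deposit_severity_py tariffs out) := by unfold Spec_worst_deposit_severity_py; infer_instance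

-- ===== CLAIM (what is proved, stated in full; the proofs are below) =====
def Claim_equal_worst_deposit_severity_py : Prop := ∀ (tariffs : List (List (String × String))), Dom_worst_deposit_severity_py tariffs → Spec_worst_deposit_severity_py tariffs (worst_deposit_severity_py tariffs)

-- ===== LEMMAS AND PROOFS =====

-- abbreviation used by the proofs: the rank of a severity name
def pvRnk (s : String) : Int := pvRankTbl.getD s 0

theorem rnk_light : pvRnk "light" = 0 := rfl
theorem rnk_moderate : pvRnk "moderate" = 1 := rfl
theorem rnk_onerous : pvRnk "onerous" = 2 := rfl
theorem rnk_prohibitive : pvRnk "prohibitive" = 3 := rfl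
theorem nameTbl_zero : pvNameTbl.get? 0 = none := rfl
theorem nameTbl_one : pvNameTbl.get? 1 = some "moderate" := rfl
theorem nameTbl_two : pvNameTbl.get? 2 = some "onerous" := rfl
theorem nameTbl_three : pvNameTbl.get? 3 = some "prohibitive" := rfl

-- Dict.get? over the raw association list is the first-match lookup A uses.
theorem dictGet_eq_assoc (t : List (String × String)) (k : String) :
    (PySem.Dict.mk t).get? k = pvGetAssoc t k := by
  induction t with
  | nil => rfl
  | cons p rest ih =>
      obtain ⟨k0, v0⟩ := p
      rw [PySem.Dict.get?_mk_cons]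
      simp only [pvGetAssoc, List.find?_cons]
      by_cases h : (k0 == k) = true
      · simp [h]
      · simp only [h, if_false, Bool.false_eq_true]
        exact ih

-- B's per-tariff rank is the rank of A's per-tariff severity name.
theorem rankOf_eq (t : List (String × String)) :
    pvRankOf t = pvRnk (tariff_deposit_severity_py t) := by
  have hc : ∀ s : String, pvRankTbl.contains s = pvInSevDict s := by
    intro s
    simp only [pvRankTbl, pvInSevDict, PySem.Dict.contains_mk, List.any_cons, List.any_nil,
      Bool.or_false]
    apply Bool.eq_iff_iff.mpr
    simp only [Bool.or_eq_true, beq_iff_eq]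
    constructor
    · rintro (h|h|h|h) <;> subst h <;> simp
    · rintro (((h|h)|h)|h) <;> subst h <;> simp
  simp only [pvRankOf, pvRnk, tariff_deposit_severity_py, dictGet_eq_assoc, hc]
  cases hget : pvGetAssoc t "deposit_severity" with
  | none =>
      cases h2 : pvGetAssoc t "deposit_onerous" with
      | none => simp [pvTruthy]
      | some v => simp [pvTruthy]
  | some s =>
      by_cases h : pvInSevDict s = true
      · simp [h]
      · simp only [h, if_false, Bool.false_eq_true]
        cases h2 : pvGetAssoc t "deposit_onerous" with
        | none => simp [pvTruthy]
        | some v => simp [pvTruthy]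

-- every severity name the helper returns is one of the four tier names
theorem sev_four (t : List (String × String)) :
    tariff_deposit_severity_py t = "light" ∨ tariff_deposit_severity_py t = "moderate" ∨
    tariff_deposit_severity_py t = "onerous" ∨ tariff_deposit_severity_py t = "prohibitive" := by
  unfold tariff_deposit_severity_py
  cases pvGetAssoc t "deposit_severity" with
  | none =>
      dsimp only
      split
      · exact Or.inr (Or.inr (Or.inl rfl))
      · exact Or.inl rfl
  | some s =>
      dsimp only
      by_cases h : pvInSevDict s = true
      · simp only [h, if_true]
        rcases (by simpa [pvInSevDict, or_assoc] using h :
          s = "light" ∨ s = "moderate" ∨ s = "onerous" ∨ s = "prohibitive") with h|h|h|h <;>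
          simp [h]
      · simp only [h, if_false, Bool.false_eq_true]
        split
        · exact Or.inr (Or.inr (Or.inl rfl))
        · exact Or.inl rfl

-- the running maximum is bounded above by any bound on the entries and the start
theorem foldl_max_le {α : Type} (f : α → Int) (B : Int) :
    ∀ (xs : List α) (init : Int), init ≤ B → (∀ x ∈ xs, f x ≤ B) →
      xs.foldl (fun w x => max w (f x)) init ≤ B := by
  intro xs
  induction xs with
  | nil => intro init h _; simpa using h
  | cons y ys ih =>
      intro init hinit hall
      simp only [List.foldl_cons]
      exact ih _ (max_le hinit (hall y (by simp))) (fun x hx => hall x (by simp [hx]))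

theorem worst_spec_core (tariffs : List (List (String × String))) :
    worst_deposit_severity_py tariffs = worst_deposit_severity_py_alt tariffs := by
  -- rewrite B as pvNameTbl.get? of a running max of pvRnk over A's severity names
  have hbody : (fun (w : Int) (t : List (String × String)) =>
      let r := pvRankOf t; if r > w then r else w) =
      (fun w t => max w (pvRnk (tariff_deposit_severity_py t))) := by
    funext w t
    rw [show pvRankOf t = pvRnk (tariff_deposit_severity_py t) from rankOf_eq t]
    dsimp only
    rw [max_def]
    split_ifs <;> omega
  have halt : worst_deposit_severity_py_alt tariffs =
      pvNameTbl.get? ((tariffs.map tariff_deposit_severity_py).foldl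
        (fun w x => max w (pvRnk x)) 0) := by
    show pvNameTbl.get? (tariffs.foldl
      (fun w t => let r := pvRankOf t; if r > w then r else w) 0) = _
    rw [hbody]
    exact congrArg pvNameTbl.get?
      (List.foldl_map (f := tariff_deposit_severity_py)
        (g := fun (w : Int) x => max w (pvRnk x)) (l := tariffs) (init := 0)).symm
  rw [halt]
  unfold worst_deposit_severity_py
  set s : List String := tariffs.map tariff_deposit_severity_py with hs
  set W : Int := s.foldl (fun w x => max w (pvRnk x)) 0 with hWdef
  have hall : ∀ x ∈ s, x = "light" ∨ x = "moderate" ∨ x = "onerous" ∨ x = "prohibitive" := by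
    intro x hx
    rcases List.mem_map.mp (hs ▸ hx) with ⟨t, _, rfl⟩
    exact sev_four t
  have hlb := PySem.List.le_foldl_max_int s pvRnk 0
  by_cases hp : ("prohibitive" : String) ∈ s
  · -- worst rank = 3, A's max is "prohibitive"
    have h3 : (3 : Int) ≤ W := by
      have := hlb.2 _ hp; rw [rnk_prohibitive] at this; exact this
    have hub : W ≤ 3 := by
      refine foldl_max_le _ 3 s 0 (by omega) ?_
      intro x hx
      rcases hall x hx with h|h|h|h <;> subst h <;>
        simp [rnk_light, rnk_moderate, rnk_onerous, rnk_prohibitive]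
    have hw3 : W = 3 := le_antisymm hub h3
    have hnil : tariffs ≠ [] := by
      intro h; subst h; simp [hs] at hp
    simp only [hnil, if_false]
    set firing : List String := s.filter (fun x => x != "light") with hf
    have hpf : ("prohibitive" : String) ∈ firing := by
      simp [hf, List.mem_filter, hp]
    have hfe : firing ≠ [] := fun h => by simp [h] at hpf
    rcases Option.ne_none_iff_exists'.mp
      ((PySem.List.max?_eq_none_iff (xs := firing) (key := pvSevP)).not.mpr hfe ∘ id) with ⟨m, hm⟩
    have hmmem : m ∈ firing := PySem.List.max?_mem hm
    have hmax : ∀ y ∈ firing, pvSevP y ≤ pvSevP m := PySem.List.max?_isMax hm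
    have hms : m ∈ s := (List.mem_filter.mp (hf ▸ hmmem)).1
    have hml : m ≠ "light" := by
      have := (List.mem_filter.mp (hf ▸ hmmem)).2; simpa using this
    have h50 : (50 : Int) ≤ pvSevP m := by simpa [pvSevP] using hmax _ hpf
    have hmp : m = "prohibitive" := by
      rcases hall m hms with h|h|h|h
      · exact absurd h hml
      · subst h; simp [pvSevP] at h50
      · subst h; simp [pvSevP] at h50
      · exact h
    rw [hw3, nameTbl_three]
    simp [hfe, hm, hmp]
  · have hup : ∀ x ∈ s, x ≠ "prohibitive" := fun x hx h => hp (h ▸ hx)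
    by_cases ho : ("onerous" : String) ∈ s
    · -- worst rank = 2, A's max is "onerous"
      have h2 : (2 : Int) ≤ W := by
        have := hlb.2 _ ho; rw [rnk_onerous] at this; exact this
      have hub : W ≤ 2 := by
        refine foldl_max_le _ 2 s 0 (by omega) ?_
        intro x hx
        rcases hall x hx with h|h|h|h
        · subst h; rw [rnk_light]; omega
        · subst h; rw [rnk_moderate]; omega
        · subst h; rw [rnk_onerous]
        · exact absurd h (hup x hx)
      have hw2 : W = 2 := le_antisymm hub h2
      have hnil : tariffs ≠ [] := by
        intro h; subst h; simp [hs] at ho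
      simp only [hnil, if_false]
      set firing : List String := s.filter (fun x => x != "light") with hf
      have hof : ("onerous" : String) ∈ firing := by
        simp [hf, List.mem_filter, ho]
      have hfe : firing ≠ [] := fun h => by simp [h] at hof
      rcases Option.ne_none_iff_exists'.mp
        ((PySem.List.max?_eq_none_iff (xs := firing) (key := pvSevP)).not.mpr hfe ∘ id) with ⟨m, hm⟩
      have hmmem : m ∈ firing := PySem.List.max?_mem hm
      have hmax : ∀ y ∈ firing, pvSevP y ≤ pvSevP m := PySem.List.max?_isMax hm
      have hms : m ∈ s := (List.mem_filter.mp (hf ▸ hmmem)).1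
      have hml : m ≠ "light" := by
        have := (List.mem_filter.mp (hf ▸ hmmem)).2; simpa using this
      have h30 : (30 : Int) ≤ pvSevP m := by simpa [pvSevP] using hmax _ hof
      have hmo : m = "onerous" := by
        rcases hall m hms with h|h|h|h
        · exact absurd h hml
        · subst h; simp [pvSevP] at h30
        · exact h
        · exact absurd h (hup m hms)
      rw [hw2, nameTbl_two]
      simp [hfe, hm, hmo]
    · have huo : ∀ x ∈ s, x ≠ "onerous" := fun x hx h => ho (h ▸ hx)
      by_cases hmod : ("moderate" : String) ∈ s
      · -- worst rank = 1, A's max is "moderate"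
        have h1 : (1 : Int) ≤ W := by
          have := hlb.2 _ hmod; rw [rnk_moderate] at this; exact this
        have hub : W ≤ 1 := by
          refine foldl_max_le _ 1 s 0 (by omega) ?_
          intro x hx
          rcases hall x hx with h|h|h|h
          · subst h; rw [rnk_light]; omega
          · subst h; rw [rnk_moderate]
          · exact absurd h (huo x hx)
          · exact absurd h (hup x hx)
        have hw1 : W = 1 := le_antisymm hub h1
        have hnil : tariffs ≠ [] := by
          intro h; subst h; simp [hs] at hmod
        simp only [hnil, if_false]
        set firing : List String := s.filter (fun x => x != "light") with hf
        have hmf : ("moderate" : String) ∈ firing := by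
          simp [hf, List.mem_filter, hmod]
        have hfe : firing ≠ [] := fun h => by simp [h] at hmf
        rcases Option.ne_none_iff_exists'.mp
          ((PySem.List.max?_eq_none_iff (xs := firing) (key := pvSevP)).not.mpr hfe ∘ id) with ⟨m, hm⟩
        have hmmem : m ∈ firing := PySem.List.max?_mem hm
        have hms : m ∈ s := (List.mem_filter.mp (hf ▸ hmmem)).1
        have hml : m ≠ "light" := by
          have := (List.mem_filter.mp (hf ▸ hmmem)).2; simpa using this
        have hmm : m = "moderate" := by
          rcases hall m hms with h|h|h|h
          · exact absurd h hml
          · exact h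
          · exact absurd h (huo m hms)
          · exact absurd h (hup m hms)
        rw [hw1, nameTbl_one]
        simp [hfe, hm, hmm]
      · -- everything is "light": both sides give none
        have hlight : ∀ x ∈ s, x = "light" := by
          intro x hx
          rcases hall x hx with h|h|h|h
          · exact h
          · exact absurd hx (h ▸ hmod)
          · exact absurd hx (h ▸ ho)
          · exact absurd hx (h ▸ hp)
        have hub : W ≤ 0 := by
          refine foldl_max_le _ 0 s 0 le_rfl ?_
          intro x hx; rw [hlight x hx, rnk_light]
        have hw0 : W = 0 := le_antisymm hub hlb.1
        have hfe : s.filter (fun x => x != "light") = [] := by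
          rw [List.filter_eq_nil_iff]
          intro x hx; simp [hlight x hx]
        rw [hw0, nameTbl_zero]
        by_cases hnil : tariffs = []
        · simp [hnil]
        · simp [hnil, hfe]

-- ===== VERDICT (by name: the statement is the Claim_ definition above) =====
theorem worst_deposit_severity_py_spec : Claim_equal_worst_deposit_severity_py := by
  intro tariffs _
  unfold Spec_worst_deposit_severity_py
  exact worst_spec_core tariffs
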